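-- pv_equiv track=rewrite | github.com/xiwen-haochi/pyliteflux | pyliteflux/core.py | match_route_pattern
-- ===== SOURCE A (Python) =====
-- from typing import (
--     Dict,
--     Any,
--     Callable,
--     Optional,
--     Tuple,
--     List,
--     Iterator,
--     Generator,
--     Union,
-- )
-- from typing import Callable, Any, Optional
--
-- def match_route_pattern(pattern: str, path: str) -> Optional[Dict[str, str]]:
--     """
--     匹配路由模式并提取参数
--     返回: 路径参数字典 或 None(如果不匹配)
--     """
--     # 分割路径
--     pattern_parts = pattern.split("/")
--     path_parts = path.split("/")
--
--     # 检查路径段是否相同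
--     if len(pattern_parts) != len(path_parts):
--         return None
--
--     # 提取参数
--     params = {}
--     for pattern_part, path_part in zip(pattern_parts, path_parts):
--         # 检查是否是参数部分
--         if pattern_part.startswith("{") and pattern_part.endswith("}"):
--             param_name = pattern_part[1:-1]
--             # 检查参数值是否为数字
--             if not path_part.isdigit():
--                 return None
--             params[param_name] = int(path_part)  # 转换为整数
--         # 检查是否是静态部分
--         elif pattern_part != path_part:
--             return None
--
--     return params
-- ===== SOURCE B (Python) =====
-- def match_route_pattern(pattern, path):
--     """Recursive collect of (name, value) pairs, dict built once at the end."""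
--     pairs = _collect(pattern.split("/"), path.split("/"))
--     return None if pairs is None else dict(pairs)
--
--
-- def _collect(pparts, sparts):
--     if not pparts and not sparts:
--         return []
--     if not pparts or not sparts:
--         return None
--     p, s = pparts[0], sparts[0]
--     if p.startswith("{") and p.endswith("}"):
--         if not s.isdigit():
--             return None
--         rest = _collect(pparts[1:], sparts[1:])
--         return None if rest is None else [(p[1:-1], int(s))] + rest
--     if p != s:
--         return None
--     return _collect(pparts[1:], sparts[1:])
-- ===== Notes on version B (the rewrite author's own statement) =====
-- stated objective: alternative
-- what changed: Replaces the length precheck plus one-pass loop threading a dict accumulator with a structural recursion over the two segment lists (mismatched lengths detected by the recursion itself) that collects the (name, value) pairs and builds the dict once at the end with dict(pairs).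
import Mathlib
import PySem

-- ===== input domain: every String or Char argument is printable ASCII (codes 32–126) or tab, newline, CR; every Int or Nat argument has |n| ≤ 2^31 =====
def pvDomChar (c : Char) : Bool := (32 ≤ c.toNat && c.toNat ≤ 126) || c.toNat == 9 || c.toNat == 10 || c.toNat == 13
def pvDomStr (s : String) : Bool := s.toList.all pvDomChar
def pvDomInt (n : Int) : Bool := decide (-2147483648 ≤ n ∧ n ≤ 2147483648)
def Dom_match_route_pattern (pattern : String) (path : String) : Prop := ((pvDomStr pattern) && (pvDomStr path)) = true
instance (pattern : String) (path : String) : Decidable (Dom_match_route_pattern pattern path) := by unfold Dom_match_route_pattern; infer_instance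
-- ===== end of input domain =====

-- B replaces the length precheck + dict-accumulating loop with a structural recursion collecting (name, value) pairs, dict built once at the end (alternative decomposition, same cost).
-- ===== PORT A =====
-- int(path_part) is executed only after isdigit succeeded, so ofStr? is some; .getD 0 unreachable
def matchLoopA (pairs : List (String × String)) (params : PySem.Dict String Int) : Option (PySem.Dict String Int) :=
  match pairs with
  | [] => some params
  | (pp, sp) :: rest =>
    if PySem.Str.startswith pp "{" && PySem.Str.endswith pp "}" then
      if !PySem.Str.strIsdigit sp then none
      else matchLoopA rest (params.insert (PySem.Str.slice pp (some 1) (some (-1))) ((PySem.Int.ofStr? sp).getD 0))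
    else if pp ≠ sp then none
    else matchLoopA rest params

def match_route_pattern (pattern : String) (path : String) : Option (List (String × Int)) :=
  let pattern_parts := (PySem.Str.split? pattern "/").getD []   -- sep "/" is nonempty: split? is always some
  let path_parts := (PySem.Str.split? path "/").getD []
  if pattern_parts.length ≠ path_parts.length then none
  else (matchLoopA (pattern_parts.zip path_parts) PySem.Dict.empty).map PySem.Dict.items

-- ===== PORT B =====
def collectB : List String → List String → Option (List (String × Int))
  | [], [] => some []
  | [], _ :: _ => none
  | _ :: _, [] => none
  | p :: ps, s :: ss =>
    if PySem.Str.startswith p "{" && PySem.Str.endswith p "}" then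
      if !PySem.Str.strIsdigit s then none
      else (collectB ps ss).map
        (fun rest => (PySem.Str.slice p (some 1) (some (-1)), (PySem.Int.ofStr? s).getD 0) :: rest)
    else if p ≠ s then none
    else collectB ps ss

def match_route_pattern_alt (pattern : String) (path : String) : Option (List (String × Int)) :=
  (collectB ((PySem.Str.split? pattern "/").getD []) ((PySem.Str.split? path "/").getD [])).map
    (fun pairs => (PySem.Dict.ofList pairs).items)

-- ===== PRECONDITION & SPEC =====
def Spec_match_route_pattern (pattern : String) (path : String) (out : Option (List (String × Int))) : Prop := out = match_route_pattern_alt pattern path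
instance (pattern : String) (path : String) (out : Option (List (String × Int))) : Decidable (Spec_match_route_pattern pattern path out) := by unfold Spec_match_route_pattern; infer_instance

-- ===== CLAIM (what is proved, stated in full; the proofs are below) =====
def Claim_equal_match_route_pattern : Prop := ∀ (pattern : String) (path : String), Dom_match_route_pattern pattern path → Spec_match_route_pattern pattern path (match_route_pattern pattern path)

-- ===== LEMMAS AND PROOFS =====
theorem collectB_none_of_length_ne (ps ss : List String) (h : ps.length ≠ ss.length) :
    collectB ps ss = none := by
  induction ps generalizing ss with
  | nil => cases ss with
    | nil => simp at h
    | cons s ss => simp [collectB]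
  | cons p ps ih =>
    cases ss with
    | nil => simp [collectB]
    | cons s ss =>
      simp only [List.length_cons] at h
      have h' : ps.length ≠ ss.length := by omega
      simp [collectB, ih ss h']

theorem loopA_eq_collectB (ps ss : List String) (d : PySem.Dict String Int)
    (h : ps.length = ss.length) :
    matchLoopA (ps.zip ss) d =
      (collectB ps ss).map (fun pairs => pairs.foldl (fun d kv => d.insert kv.1 kv.2) d) := by
  induction ps generalizing ss d with
  | nil =>
    cases ss with
    | nil => simp [matchLoopA, collectB]
    | cons s ss => simp at h
  | cons p ps ih =>
    cases ss with
    | nil => simp at h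
    | cons s ss =>
      simp only [List.length_cons] at h
      have h' : ps.length = ss.length := by omega
      simp only [List.zip_cons_cons, matchLoopA, collectB]
      split
      · split
        · simp
        · rw [ih ss _ h']
          cases hc : collectB ps ss <;> simp
      · split
        · simp
        · rw [ih ss d h']

-- ===== VERDICT (by name: the statement is the Claim_ definition above) =====
theorem match_route_pattern_spec : Claim_equal_match_route_pattern := by
  intro pattern path _
  unfold Spec_match_route_pattern match_route_pattern match_route_pattern_alt
  set ps := (PySem.Str.split? pattern "/").getD [] with hps
  set ss := (PySem.Str.split? path "/").getD [] with hss
  by_cases h : ps.length = ss.length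
  · simp only [h, ne_eq, not_true_eq_false, if_false]
    rw [loopA_eq_collectB ps ss PySem.Dict.empty h]
    cases hc : collectB ps ss with
    | none => simp
    | some pairs =>
      have : PySem.Dict.ofList pairs = pairs.foldl (fun d kv => d.insert kv.1 kv.2) PySem.Dict.empty := PySem.Dict.ext_iff.mpr rfl
      simp [this]
  · simp [h, collectB_none_of_length_ne ps ss h]
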